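-- pv_equiv track=rewrite | github.com/AndreeSalazar/PyDead-BIB | pyb_ai/model.py | mdl_forward
-- ===== SOURCE A (Python) =====
-- def mdl_forward(token_id, vocab, layers):
--     h = token_id * 31 + 7
--     i = 0
--     while i < layers:
--         h = h * 17 + 13
--         h = h % 65536
--         i = i + 1
--     return h % vocab
-- ===== SOURCE B (Python) =====
-- def mdl_forward(token_id, vocab, layers):
--     # Closed form: h_n = 17^n * h0 + 13*(17^n - 1)/16 (mod 65536),
--     # computed with one modular exponentiation instead of a loop.
--     h = token_id * 31 + 7
--     if layers > 0:
--         p = pow(17, layers, 1 << 20)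
--         h = (p * h + 13 * ((p - 1) // 16)) % 65536
--     return h % vocab
-- ===== Notes on version B (the rewrite author's own statement) =====
-- stated objective: faster
-- what changed: Replaced the O(layers) iterated affine-mod loop by the closed form h_n = 17^n*h0 + 13*(17^n-1)/16 (mod 65536), computed with one modular exponentiation pow(17, layers, 2^20).
import Mathlib
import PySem

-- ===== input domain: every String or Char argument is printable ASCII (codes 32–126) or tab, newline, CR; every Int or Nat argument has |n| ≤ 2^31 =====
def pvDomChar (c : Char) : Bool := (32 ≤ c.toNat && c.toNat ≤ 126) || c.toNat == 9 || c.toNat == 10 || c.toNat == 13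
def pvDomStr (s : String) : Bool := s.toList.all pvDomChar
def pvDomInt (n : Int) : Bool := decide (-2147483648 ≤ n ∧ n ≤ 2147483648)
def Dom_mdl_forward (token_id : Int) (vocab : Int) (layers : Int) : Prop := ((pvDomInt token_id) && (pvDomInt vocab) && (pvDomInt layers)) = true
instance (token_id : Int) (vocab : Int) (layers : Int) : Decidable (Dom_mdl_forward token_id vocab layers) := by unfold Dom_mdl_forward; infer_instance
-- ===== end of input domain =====

-- B computes the hash by a closed form with one modular exponentiation instead of A's per-layer loop (faster, asymptotic).


-- ===== PORT A =====
-- the while loop: runs once per i with 0 ≤ i < layers, i.e. layers.toNat times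
def mdlLoopA (h : Int) : Nat → Int
  | 0 => h
  | n + 1 => mdlLoopA (PySem.Int.mod (h * 17 + 13) 65536) n

def mdl_forward (token_id : Int) (vocab : Int) (layers : Int) : Int :=
  PySem.Int.mod (mdlLoopA (token_id * 31 + 7) layers.toNat) vocab

-- ===== PORT B =====
def mdl_forward_alt (token_id : Int) (vocab : Int) (layers : Int) : Int :=
  let h0 := token_id * 31 + 7
  let h1 :=
    if 0 < layers then
      let p := PySem.Int.powMod 17 layers.toNat 1048576  -- pow(17, layers, 1 << 20)
      PySem.Int.mod (p * h0 + 13 * PySem.Int.floordiv (p - 1) 16) 65536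
    else h0
  PySem.Int.mod h1 vocab

-- ===== PRECONDITION & SPEC =====
-- Pre_ excludes exactly vocab = 0, on which the Python A raises ZeroDivisionError at `h % vocab`.
def Pre_mdl_forward (token_id : Int) (vocab : Int) (layers : Int) : Prop := vocab ≠ 0
instance (token_id : Int) (vocab : Int) (layers : Int) : Decidable (Pre_mdl_forward token_id vocab layers) := by unfold Pre_mdl_forward; infer_instance
def pvWitness_mdl_forward : Int × Int × Int := (5, 50000, 3)

def Spec_mdl_forward (token_id : Int) (vocab : Int) (layers : Int) (out : Int) : Prop := out = mdl_forward_alt token_id vocab layers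
instance (token_id : Int) (vocab : Int) (layers : Int) (out : Int) : Decidable (Spec_mdl_forward token_id vocab layers out) := by unfold Spec_mdl_forward; infer_instance

-- ===== CLAIM (what is proved, stated in full; the proofs are below) =====
def Claim_equal_mdl_forward : Prop := ∀ (token_id : Int) (vocab : Int) (layers : Int), Dom_mdl_forward token_id vocab layers → Pre_mdl_forward token_id vocab layers → Spec_mdl_forward token_id vocab layers (mdl_forward token_id vocab layers)

-- ===== LEMMAS AND PROOFS =====

-- geometric sum ∑_{k<n} 17^k, the exact coefficient of 13 accumulated by A's loop
def geo17 : Nat → Int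
  | 0 => 0
  | n + 1 => geo17 n + 17 ^ n

theorem geo17_mul (n : Nat) : 16 * geo17 n = 17 ^ n - 1 := by
  induction n with
  | zero => simp [geo17]
  | succ n ih => simp only [geo17, pow_succ]; linarith

theorem emod_absorb (a x c M : Int) : (a * (x % M) + c) % M = (a * x + c) % M := by
  conv_lhs => rw [Int.add_emod, Int.mul_emod, Int.emod_emod_of_dvd x dvd_rfl,
    ← Int.mul_emod, ← Int.add_emod]

theorem loopA_closed (h : Int) (n : Nat) :
    mdlLoopA h (n + 1) = (17 ^ (n + 1) * h + 13 * geo17 (n + 1)) % 65536 := by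
  induction n generalizing h with
  | zero =>
    show mdlLoopA (PySem.Int.mod (h * 17 + 13) 65536) 0 = _
    simp only [mdlLoopA, PySem.Int.mod_eq_emod_of_pos (by norm_num : (0:Int) < 65536), geo17]
    congr 1; ring
  | succ n ih =>
    show mdlLoopA (PySem.Int.mod (h * 17 + 13) 65536) (n + 1) = _
    rw [ih, PySem.Int.mod_eq_emod_of_pos (by norm_num : (0:Int) < 65536), emod_absorb]
    congr 1
    simp only [geo17]
    ring

theorem closedB_eq (h : Int) (n : Nat) :
    (PySem.Int.powMod 17 n 1048576 * h +
      13 * PySem.Int.floordiv (PySem.Int.powMod 17 n 1048576 - 1) 16) % 65536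
      = (17 ^ n * h + 13 * geo17 n) % 65536 := by
  set p : Int := PySem.Int.powMod 17 n 1048576 with hpdef
  have hppos : (0:Int) < 1048576 := by norm_num
  have hp0 : 0 ≤ p := PySem.Int.powMod_nonneg 17 n hppos
  have hp : p = 17 ^ n - 1048576 * ((17:Int) ^ n / 1048576) := by
    rw [hpdef]
    unfold PySem.Int.powMod
    rw [PySem.Int.mod_eq_emod_of_pos hppos, Int.emod_def]
  set q : Int := (17:Int) ^ n / 1048576 with hqdef
  set k : Int := geo17 n - 65536 * q with hkdef
  have hpk : p - 1 = 16 * k := by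
    rw [hp, hkdef]
    have := geo17_mul n
    ring_nf
    linarith
  have hdiv : PySem.Int.floordiv (p - 1) 16 = k := by
    rw [hpk, PySem.Int.floordiv_eq_ediv_of_pos (by norm_num : (0:Int) < 16),
      Int.mul_ediv_cancel_left k (by norm_num : (16:Int) ≠ 0)]
  rw [hdiv]
  have hnum : p * h + 13 * k = (17 ^ n * h + 13 * geo17 n) + 65536 * (-(16 * q * h) - 13 * q) := by
    rw [hp, hkdef]; ring
  rw [hnum, Int.add_mul_emod_self_left]

theorem loop_eq_closed (t l : Int) (hl : 0 < l) :
    mdlLoopA (t * 31 + 7) l.toNat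
      = PySem.Int.mod (PySem.Int.powMod 17 l.toNat 1048576 * (t * 31 + 7) +
          13 * PySem.Int.floordiv (PySem.Int.powMod 17 l.toNat 1048576 - 1) 16) 65536 := by
  obtain ⟨n, hn⟩ : ∃ n, l.toNat = n + 1 := by
    have : 0 < l.toNat := by omega
    exact ⟨l.toNat - 1, by omega⟩
  rw [hn, PySem.Int.mod_eq_emod_of_pos (by norm_num : (0:Int) < 65536),
    loopA_closed, closedB_eq]

-- ===== VERDICT (by name: the statement is the Claim_ definition above) =====
theorem mdl_forward_spec : Claim_equal_mdl_forward := by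
  intro t v l _ _
  unfold Spec_mdl_forward mdl_forward mdl_forward_alt
  by_cases hl : 0 < l
  · simp only [hl, if_true]
    rw [loop_eq_closed t l hl]
  · have : l.toNat = 0 := by omega
    simp only [hl, if_false, this, mdlLoopA]
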